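-- pv_equiv track=rewrite | github.com/dlion168/CosyVoice-TTS | examples/libritts/cosyvoice/cosyvoice/bin/inference_dialogue_overlap.py | merge_consecutive_tuples
-- ===== SOURCE A (Python) =====
-- from typing import Any, Dict, List, Tuple
--
-- def merge_consecutive_tuples(conversations: List[Tuple[str, str]]) -> List[Tuple[str, str]]:
--     """
--     Merges consecutive tuples with the same role by concatenating their messages.
--
--     Args:
--         conversations (List[Tuple[str, str]]): A list of tuples where each tuple contains:
--             - A role (e.g., 'user' or 'machine').
--             - A message string.
--
--     Returns:
--         List[Tuple[str, str]]: A new list where consecutive tuples with the same role are merged,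
--         with their messages concatenated, separated by a blank space.
--     """
--     if not conversations:
--         return []
--
--     merged_conversations = [conversations[0]]  # Start with the first conversation
--
--     for role, message in conversations[1:]:
--         last_role, last_message = merged_conversations[-1]
--
--         if role == last_role:
--             # If the current role is the same as the last role, merge the messages
--             merged_conversations[-1] = (role, last_message + ' ' + message)
--         else:
--             # Otherwise, just append the new tuple
--             merged_conversations.append((role, message))
--
--     return merged_conversations
-- ===== SOURCE B (Python) =====
-- from typing import List, Tuple
--
-- def merge_consecutive_tuples(conversations: List[Tuple[str, str]]) -> List[Tuple[str, str]]:
--     # Stage 1: compute the index of every run start (index 0, or role differs from predecessor).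
--     n = len(conversations)
--     starts = [i for i in range(n)
--               if i == 0 or conversations[i][0] != conversations[i - 1][0]]
--     # Stage 2: slice each run out by its boundary pair and join its messages.
--     bounds = starts + [n]
--     return [(conversations[s][0], ' '.join(m for _, m in conversations[s:e]))
--             for s, e in zip(bounds, bounds[1:])]
-- ===== Notes on version B (the rewrite author's own statement) =====
-- stated objective: alternative
-- what changed: Replaces A's single accumulator loop that mutates the last result element with two staged passes: first compute the list of run-start indices (index 0 or role differs from predecessor), then slice each run out by its boundary pair and join its messages with ' '.join.
import Mathlib
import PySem

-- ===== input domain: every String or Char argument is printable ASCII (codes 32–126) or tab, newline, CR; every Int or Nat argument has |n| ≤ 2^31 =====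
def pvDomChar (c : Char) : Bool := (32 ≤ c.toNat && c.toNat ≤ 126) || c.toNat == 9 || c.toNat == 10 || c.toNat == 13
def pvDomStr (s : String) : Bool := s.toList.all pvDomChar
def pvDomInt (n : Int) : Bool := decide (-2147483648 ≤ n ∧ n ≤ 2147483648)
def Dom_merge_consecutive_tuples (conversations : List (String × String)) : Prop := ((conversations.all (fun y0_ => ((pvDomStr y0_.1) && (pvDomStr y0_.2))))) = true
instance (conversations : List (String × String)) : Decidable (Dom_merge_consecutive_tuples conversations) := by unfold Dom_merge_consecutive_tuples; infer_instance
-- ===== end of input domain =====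

-- B replaces A's single accumulator loop (mutating the last element in place) by two
-- staged passes: compute all run-start indices, then slice each run out by its boundary
-- pair and join its messages (objective: alternative; same asymptotic cost).


-- ===== PORT A =====
-- A's loop keeps merged_conversations; we keep it as (last element, reverse of the
-- earlier elements): merged_conversations[-1] is `last`, append pushes onto `revdone`.
def mergeGoA (last : String × String) (revdone : List (String × String)) :
    List (String × String) → List (String × String)
  | [] => (last :: revdone).reverse
  | (role, message) :: rest =>
      if role == last.1 then
        mergeGoA (role, last.2 ++ " " ++ message) revdone rest
      else
        mergeGoA (role, message) (last :: revdone) rest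

def merge_consecutive_tuples (conversations : List (String × String)) : List (String × String) :=
  match conversations with
  | [] => []
  | first :: rest => mergeGoA first [] rest

-- ===== PORT B =====
-- conversations[i][0]; the indices B uses are always in range, so getD is exact there.
def pvRoleAt (conv : List (String × String)) (i : Nat) : String :=
  (conv.getD i ("", "")).1

-- starts = [i for i in range(n) if i == 0 or conversations[i][0] != conversations[i-1][0]]
def pvStarts (conv : List (String × String)) : List Nat :=
  (List.range conv.length).filter
    (fun i => i == 0 || !(pvRoleAt conv i == pvRoleAt conv (i - 1)))

-- conversations[s:e] with 0 ≤ s ≤ e ≤ n is exactly (drop s).take (e-s);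
-- ' '.join → PySem.Str.join " " (exact); zip(bounds, bounds[1:]) → bounds.zip bounds.tail.
def pvBounds (conversations : List (String × String)) : List Nat :=
  pvStarts conversations ++ [conversations.length]

def merge_consecutive_tuples_alt (conversations : List (String × String)) : List (String × String) :=
  ((pvBounds conversations).zip (pvBounds conversations).tail).map (fun se =>
    (pvRoleAt conversations se.1,
     PySem.Str.join " " (((conversations.drop se.1).take (se.2 - se.1)).map Prod.snd)))

-- ===== PRECONDITION & SPEC =====
def Spec_merge_consecutive_tuples (conversations : List (String × String)) (out : List (String × String)) : Prop := out = merge_consecutive_tuples_alt conversations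
instance (conversations : List (String × String)) (out : List (String × String)) : Decidable (Spec_merge_consecutive_tuples conversations out) := by unfold Spec_merge_consecutive_tuples; infer_instance

-- ===== CLAIM (what is proved, stated in full; the proofs are below) =====
def Claim_equal_merge_consecutive_tuples : Prop := ∀ (conversations : List (String × String)), Dom_merge_consecutive_tuples conversations → Spec_merge_consecutive_tuples conversations (merge_consecutive_tuples conversations)

-- ===== LEMMAS AND PROOFS =====

-- canonical run decomposition both ports are reduced to
def runsCanon : List (String × String) → List (String × String)
  | [] => []
  | (r, m) :: rest =>
      (r, PySem.Str.join " " (m :: (rest.takeWhile (fun p => p.1 == r)).map Prod.snd))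
        :: runsCanon (rest.dropWhile (fun p => p.1 == r))
termination_by l => l.length
decreasing_by
  simp only [List.length_cons]
  have := List.length_dropWhile_le (p := fun p => p.1 == r) (l := rest)
  omega

theorem foldl_sep_pre (xs : List String) : ∀ (a b : String),
    xs.foldl (fun acc x => acc ++ " " ++ x) (b ++ a)
      = b ++ xs.foldl (fun acc x => acc ++ " " ++ x) a := by
  induction xs with
  | nil => intro a b; simp
  | cons x xs ih =>
      intro a b
      simp only [List.foldl_cons]
      rw [show b ++ a ++ " " ++ x = b ++ (a ++ " " ++ x) by simp [String.append_assoc], ih]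

theorem join_space_eq_foldl (xs : List String) : ∀ (m : String),
    PySem.Str.join " " (m :: xs) = xs.foldl (fun a x => a ++ " " ++ x) m := by
  induction xs with
  | nil =>
      intro m
      simp [PySem.Str.join, PySem.Chars.join_singleton]
  | cons x xs ih =>
      intro m
      have hl : PySem.Str.join " " (m :: x :: xs) = m ++ " " ++ PySem.Str.join " " (x :: xs) := by
        apply String.toList_injective
        simp [PySem.Str.toList_join, PySem.Chars.join_cons_cons]
      rw [hl, ih, List.foldl_cons, ← foldl_sep_pre]

theorem mergeGoA_eq (t : List (String × String)) :
    ∀ (r m : String) (revdone : List (String × String)),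
      mergeGoA (r, m) revdone t
        = revdone.reverse
            ++ (r, (t.takeWhile (fun p => p.1 == r)).foldl (fun a p => a ++ " " ++ p.2) m)
              :: runsCanon (t.dropWhile (fun p => p.1 == r)) := by
  induction t with
  | nil => intro r m revdone; simp [mergeGoA, runsCanon]
  | cons hd tl ih =>
      intro r m revdone
      obtain ⟨r', m'⟩ := hd
      by_cases h : (r' == r) = true
      · have : r' = r := by simpa using h
        subst this
        simp [mergeGoA, List.takeWhile, List.dropWhile, ih]
      · simp [mergeGoA, h, List.takeWhile, List.dropWhile, ih, runsCanon,
              join_space_eq_foldl, List.foldl_map]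

theorem portA_eq_runsCanon (conversations : List (String × String)) :
    merge_consecutive_tuples conversations = runsCanon conversations := by
  cases conversations with
  | nil => simp [merge_consecutive_tuples, runsCanon]
  | cons first rest =>
      obtain ⟨r, m⟩ := first
      unfold merge_consecutive_tuples
      simp only [mergeGoA_eq, List.reverse_nil, List.nil_append, runsCanon,
                 join_space_eq_foldl, List.foldl_map]

-- role of conv[i] inside the first run is r
theorem roleA_of_run (r m : String) (t d : List (String × String))
    (ht : ∀ p ∈ t, p.1 = r) : ∀ i < t.length + 1,
    pvRoleAt ((r, m) :: (t ++ d)) i = r := by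
  intro i hi
  unfold pvRoleAt
  rw [← List.cons_append, List.getD_append _ _ _ i (by simpa using hi)]
  cases i with
  | zero => rfl
  | succ j =>
      have hj : j < t.length := by omega
      simp only [List.getD_cons_succ]
      rw [List.getD_eq_getElem t _ hj]
      exact ht _ (List.getElem_mem _)

-- indices past the first run address d
theorem roleShift (r m : String) (t d : List (String × String)) (s : Nat) :
    pvRoleAt ((r, m) :: (t ++ d)) (t.length + 1 + s) = pvRoleAt d s := by
  unfold pvRoleAt
  rw [← List.cons_append, List.getD_append_right]
  · simp
  · simp

theorem starts_decomp (r m : String) (t d : List (String × String))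
    (ht : ∀ p ∈ t, p.1 = r) (hd : ∀ x ∈ d.head?, ¬ x.1 = r) :
    pvStarts ((r, m) :: (t ++ d))
      = 0 :: (pvStarts d).map (fun j => t.length + 1 + j) := by
  unfold pvStarts
  rw [show ((r, m) :: (t ++ d)).length = t.length + 1 + d.length from by
        simp only [List.length_cons, List.length_append]; omega,
      List.range_add, List.filter_append, List.filter_map]
  have h1 : (List.range (t.length + 1)).filter
      (fun i => i == 0 || !(pvRoleAt ((r, m) :: (t ++ d)) i ==
        pvRoleAt ((r, m) :: (t ++ d)) (i - 1))) = [0] := by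
    rw [List.range_succ_eq_map, List.filter_cons_of_pos (by rfl)]
    have hnil : (List.filter
        (fun i => i == 0 || !(pvRoleAt ((r, m) :: (t ++ d)) i ==
          pvRoleAt ((r, m) :: (t ++ d)) (i - 1)))
        (List.map Nat.succ (List.range t.length))) = [] := by
      rw [List.filter_eq_nil_iff]
      intro a ha
      simp only [List.mem_map, List.mem_range] at ha
      obtain ⟨j, hj, rfl⟩ := ha
      have hr1 := roleA_of_run r m t d ht (j + 1) (by omega)
      have hr2 := roleA_of_run r m t d ht j (by omega)
      show ¬ ((j + 1 == 0) || !(pvRoleAt ((r, m) :: (t ++ d)) (j + 1) ==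
        pvRoleAt ((r, m) :: (t ++ d)) (j + 1 - 1))) = true
      rw [hr1, show j + 1 - 1 = j from rfl, hr2]
      simp
    rw [hnil]
  have h2 : (List.range d.length).filter
      ((fun i => i == 0 || !(pvRoleAt ((r, m) :: (t ++ d)) i ==
          pvRoleAt ((r, m) :: (t ++ d)) (i - 1))) ∘ (fun x => t.length + 1 + x))
      = (List.range d.length).filter
          (fun i => i == 0 || !(pvRoleAt d i == pvRoleAt d (i - 1))) := by
    apply List.filter_congr
    intro j hj
    simp only [List.mem_range] at hj
    simp only [Function.comp]
    cases j with
    | zero =>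
        have hra := roleShift r m t d 0
        have hrb : pvRoleAt ((r, m) :: (t ++ d)) (t.length + 1 + 0 - 1) = r := by
          rw [show t.length + 1 + 0 - 1 = t.length from by omega]
          exact roleA_of_run r m t d ht t.length (by omega)
        have hdne : ¬ pvRoleAt d 0 = r := by
          cases d with
          | nil => simp at hj
          | cons x d' =>
              have := hd x (by rfl)
              simpa [pvRoleAt] using this
        rw [hra, hrb]
        simp [hdne]
    | succ j' =>
        have hra := roleShift r m t d (j' + 1)
        have hrb : pvRoleAt ((r, m) :: (t ++ d)) (t.length + 1 + (j' + 1) - 1)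
            = pvRoleAt d j' := by
          rw [show t.length + 1 + (j' + 1) - 1 = t.length + 1 + j' from by omega]
          exact roleShift r m t d j'
        rw [hra, hrb]
        simp
  rw [h1, h2]
  rfl

theorem starts_head (x : String × String) (d' : List (String × String)) :
    ∃ l, pvStarts (x :: d') = 0 :: l := by
  unfold pvStarts
  rw [show (x :: d').length = d'.length + 1 from rfl, List.range_succ_eq_map,
      List.filter_cons_of_pos (by rfl)]
  exact ⟨_, rfl⟩

-- the slice entry at shifted boundaries (a + k, b + k) is the entry of d at (a, b)
theorem entry_shift (r m : String) (t d : List (String × String)) (a b : Nat) :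
    (pvRoleAt ((r, m) :: (t ++ d)) (t.length + 1 + a),
      PySem.Str.join " " (((((r, m) :: (t ++ d)).drop (t.length + 1 + a)).take
        ((t.length + 1 + b) - (t.length + 1 + a))).map Prod.snd))
    = (pvRoleAt d a, PySem.Str.join " " (((d.drop a).take (b - a)).map Prod.snd)) := by
  rw [roleShift]
  have hdrop : ((r, m) :: (t ++ d)).drop (t.length + 1 + a) = d.drop a := by
    rw [← List.cons_append, List.drop_append]
    have h1 : ((r, m) :: t).drop (t.length + 1 + a) = [] := by
      apply List.drop_eq_nil_of_le
      simp
    have h2 : t.length + 1 + a - ((r, m) :: t).length = a := by simp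
    rw [h1, h2, List.nil_append]
  have htake : t.length + 1 + b - (t.length + 1 + a) = b - a := by omega
  rw [hdrop, htake]

theorem portB_len : ∀ (n : Nat) (conv : List (String × String)), conv.length ≤ n →
    merge_consecutive_tuples_alt conv = runsCanon conv := by
  intro n
  induction n with
  | zero =>
      intro conv h
      have hc : conv = [] := by
        cases conv with
        | nil => rfl
        | cons a l => simp at h
      subst hc
      simp [merge_consecutive_tuples_alt, pvBounds, pvStarts, runsCanon]
  | succ n ih =>
      intro conv h
      match conv with
      | [] => simp [merge_consecutive_tuples_alt, pvBounds, pvStarts, runsCanon]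
      | (r, m) :: rest =>
        have ht : ∀ p ∈ rest.takeWhile (fun p => p.1 == r), p.1 = r := by
          intro p hp
          have := List.mem_takeWhile_imp hp
          simpa using this
        have hd : ∀ x ∈ (rest.dropWhile (fun p => p.1 == r)).head?, ¬ x.1 = r := by
          intro x hx
          have h2 := List.head?_dropWhile_not (fun p : String × String => p.1 == r) rest
          simp only [Option.mem_def] at hx
          rw [hx] at h2
          simpa using h2
        have hconv : (r, m) :: rest
            = (r, m) :: (rest.takeWhile (fun p => p.1 == r)
                ++ rest.dropWhile (fun p => p.1 == r)) := by
          rw [List.takeWhile_append_dropWhile]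
        set t := rest.takeWhile (fun p => p.1 == r) with htdef
        set d := rest.dropWhile (fun p => p.1 == r) with hddef
        have hdlen : d.length ≤ n := by
          have h1 : d.length ≤ rest.length := List.length_dropWhile_le _ _
          simp only [List.length_cons] at h
          omega
        have hbd : ∃ bl, pvStarts d ++ [d.length] = 0 :: bl := by
          cases hdc : d with
          | nil => exact ⟨[], rfl⟩
          | cons x d' =>
              obtain ⟨l, hl⟩ := starts_head x d'
              exact ⟨l ++ [(x :: d').length], by rw [hl, List.cons_append]⟩
        obtain ⟨bl, hbl⟩ := hbd
        have hcanon : runsCanon ((r, m) :: rest)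
            = (r, PySem.Str.join " " (m :: t.map Prod.snd)) :: runsCanon d := by
          rw [runsCanon]
        have hB : pvBounds ((r, m) :: (t ++ d))
            = 0 :: ((0 :: bl).map (fun j => t.length + 1 + j)) := by
          unfold pvBounds
          rw [starts_decomp r m t d ht hd,
              show ((r, m) :: (t ++ d)).length = t.length + 1 + d.length from by
                simp only [List.length_cons, List.length_append]; omega,
              show (0 :: (pvStarts d).map (fun j => t.length + 1 + j))
                    ++ [t.length + 1 + d.length]
                  = 0 :: ((pvStarts d ++ [d.length]).map (fun j => t.length + 1 + j)) from by
                simp,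
              hbl]
        rw [hcanon, hconv]
        unfold merge_consecutive_tuples_alt
        rw [hB, List.tail_cons, List.map_cons, List.zip_cons_cons, ← List.map_cons,
            List.zip_map, List.map_cons]
        congr 1
        · -- head entry: the first run
          have h0 : pvRoleAt ((r, m) :: (t ++ d)) 0 = r := roleA_of_run r m t d ht 0 (by omega)
          have htk : ((r, m) :: (t ++ d)).take (t.length + 1) = (r, m) :: t := by
            rw [← List.cons_append, show t.length + 1 = ((r, m) :: t).length from by simp]
            exact List.take_left
          simp [h0, htk]
        · -- tail entries: shifted boundaries address d
          rw [List.map_map]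
          have hmc : ∀ se ∈ (0 :: bl).zip bl,
              ((fun se => (pvRoleAt ((r, m) :: (t ++ d)) se.1,
                  PySem.Str.join " " (((((r, m) :: (t ++ d)).drop se.1).take
                    (se.2 - se.1)).map Prod.snd)))
                ∘ Prod.map (fun j => t.length + 1 + j) (fun j => t.length + 1 + j)) se
              = (fun se => (pvRoleAt d se.1,
                  PySem.Str.join " " (((d.drop se.1).take (se.2 - se.1)).map Prod.snd))) se := by
            intro se _
            obtain ⟨a, b⟩ := se
            simpa [Prod.map] using entry_shift r m t d a b
          rw [List.map_congr_left hmc]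
          have halt : merge_consecutive_tuples_alt d
              = ((0 :: bl).zip bl).map (fun se => (pvRoleAt d se.1,
                  PySem.Str.join " " (((d.drop se.1).take (se.2 - se.1)).map Prod.snd))) := by
            unfold merge_consecutive_tuples_alt
            rw [show pvBounds d = 0 :: bl from hbl, List.tail_cons]
          rw [← halt]
          exact ih d hdlen

theorem portB_eq_runsCanon (conversations : List (String × String)) :
    merge_consecutive_tuples_alt conversations = runsCanon conversations :=
  portB_len conversations.length conversations (le_refl _)

-- ===== VERDICT (by name: the statement is the Claim_ definition above) =====
theorem merge_consecutive_tuples_spec : Claim_equal_merge_consecutive_tuples := by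
  intro conversations _
  unfold Spec_merge_consecutive_tuples
  rw [portA_eq_runsCanon, portB_eq_runsCanon]
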